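-- pv_equiv track=rewrite | github.com/cobyforrester/adventofcode | 2024/9/p2.py | does_have_span_length
-- ===== SOURCE A (Python) =====
-- def does_have_span_length(arr: list[str], length: int) -> int:
--     current_tally = 0
--     for i, num in enumerate(arr):
--         if num == ".":
--             current_tally += 1
--             if current_tally == length:
--                 return i - current_tally + 1
--         else:
--             current_tally = 0
--     return -1
-- ===== SOURCE B (Python) =====
-- def does_have_span_length(arr: list[str], length: int) -> int:
--     # Run-length encode arr once, then return the start index of the first
--     # run of "." whose length is at least `length` (length < 1 never matches).
--     if length < 1:
--         return -1
--     runs = []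
--     for x in arr:
--         if runs and runs[-1][0] == x:
--             runs[-1][1] += 1
--         else:
--             runs.append([x, 1])
--     start = 0
--     for key, n in runs:
--         if key == "." and n >= length:
--             return start
--         start += n
--     return -1
-- ===== Notes on version B (the rewrite author's own statement) =====
-- stated objective: alternative
-- what changed: Instead of the single enumerate loop carrying a running tally of consecutive dots, B first run-length encodes the array and then scans the runs, returning the running start index of the first '.' run of size >= length (length < 1 handled up front).
import Mathlib
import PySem

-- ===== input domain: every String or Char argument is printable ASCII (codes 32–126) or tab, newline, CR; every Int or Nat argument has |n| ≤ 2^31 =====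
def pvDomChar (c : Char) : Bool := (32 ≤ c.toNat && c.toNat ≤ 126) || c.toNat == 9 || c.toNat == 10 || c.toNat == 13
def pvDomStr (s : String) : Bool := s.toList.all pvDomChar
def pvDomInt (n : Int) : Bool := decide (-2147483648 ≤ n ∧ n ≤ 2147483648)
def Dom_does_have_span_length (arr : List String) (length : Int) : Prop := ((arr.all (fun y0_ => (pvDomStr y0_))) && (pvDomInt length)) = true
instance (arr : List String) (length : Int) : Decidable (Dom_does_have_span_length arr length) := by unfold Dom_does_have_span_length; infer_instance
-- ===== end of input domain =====

-- B run-length encodes the array once and scans the runs for the first "." run of size ≥ length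
-- (a different decomposition of the same O(n) task; not claimed faster).

-- ===== PORT A =====
-- the enumerate loop: state = (index i, current_tally t); early return inside the loop
def goA (length : Int) : List String → Int → Int → Int
  | [], _, _ => -1
  | x :: xs, i, t =>
    if x = "." then
      if t + 1 = length then i - (t + 1) + 1
      else goA length xs (i + 1) (t + 1)
    else goA length xs (i + 1) 0

def does_have_span_length (arr : List String) (length : Int) : Int :=
  goA length arr 0 0

-- ===== PORT B =====
-- first loop of Source B: build the run-length encoding; acc holds the runs in reverse
-- (Python appends/updates at the back of `runs`; the accumulator keeps them reversed)
def runsAux : List (String × Int) → List String → List (String × Int)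
  | acc, [] => acc
  | acc, x :: xs =>
    match acc with
    | (k, n) :: rest =>
        if k = x then runsAux ((k, n + 1) :: rest) xs
        else runsAux ((x, 1) :: (k, n) :: rest) xs
    | [] => runsAux [(x, 1)] xs

-- second loop of Source B: scan the runs keeping the running start index
def scanRuns (length : Int) : List (String × Int) → Int → Int
  | [], _ => -1
  | (k, n) :: rest, start =>
    if k = "." ∧ length ≤ n then start
    else scanRuns length rest (start + n)

def does_have_span_length_alt (arr : List String) (length : Int) : Int :=
  if length < 1 then -1
  else scanRuns length ((runsAux [] arr).reverse) 0

-- ===== PRECONDITION & SPEC =====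
def Spec_does_have_span_length (arr : List String) (length : Int) (out : Int) : Prop := out = does_have_span_length_alt arr length
instance (arr : List String) (length : Int) (out : Int) : Decidable (Spec_does_have_span_length arr length out) := by unfold Spec_does_have_span_length; infer_instance

-- ===== CLAIM (what is proved, stated in full; the proofs are below) =====
def Claim_equal_does_have_span_length : Prop := ∀ (arr : List String) (length : Int), Dom_does_have_span_length arr length → Spec_does_have_span_length arr length (does_have_span_length arr length)

-- ===== LEMMAS AND PROOFS =====

def runsS : List String → List (String × Int)
  | [] => []
  | x :: xs =>
    match runsS xs with
    | (y, n) :: rest => if y = x then (y, n + 1) :: rest else (x, 1) :: (y, n) :: rest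
    | [] => [(x, 1)]

def preMerge (k : String) (n : Int) (rs : List (String × Int)) : List (String × Int) :=
  match rs with
  | (y, m) :: rest => if y = k then (k, n + m) :: rest else (k, n) :: rs
  | [] => [(k, n)]
theorem runsS_cons (x : String) (xs : List String) :
    runsS (x :: xs) = preMerge x 1 (runsS xs) := by
  cases h : runsS xs with
  | nil => simp [runsS, preMerge, h]
  | cons p rest =>
    obtain ⟨y, m⟩ := p
    by_cases hy : y = x
    · subst hy
      simp [runsS, preMerge, h]
      ring
    · simp [runsS, preMerge, h, hy]

theorem preMerge_cons_eq (k : String) (n : Int) (xs : List String) :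
    preMerge k n (runsS (k :: xs)) = preMerge k (n + 1) (runsS xs) := by
  cases h : runsS xs with
  | nil => simp [runsS, preMerge, h]
  | cons p rest =>
    obtain ⟨y, m⟩ := p
    by_cases hy : y = k
    · subst hy
      simp [runsS, preMerge, h]
      ring
    · simp [runsS, preMerge, h, hy]
theorem preMerge_head_ne (k x : String) (n : Int) (hk : ¬ k = x) (rs : List (String × Int)) :
    preMerge k n (preMerge x 1 rs) = (k, n) :: preMerge x 1 rs := by
  have hx : ¬ x = k := fun h => hk h.symm
  cases rs with
  | nil => simp [preMerge, hx]
  | cons p rest =>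
    obtain ⟨y, m⟩ := p
    by_cases hy : y = x <;> simp [preMerge, hy, hx]

theorem runsAux_eq (xs : List String) : ∀ (k : String) (n : Int) (acc : List (String × Int)),
    runsAux ((k, n) :: acc) xs = (preMerge k n (runsS xs)).reverse ++ acc := by
  induction xs with
  | nil => intro k n acc; simp [runsAux, runsS, preMerge]
  | cons x xs ih =>
    intro k n acc
    by_cases hk : k = x
    · subst hk
      simp [runsAux, ih, preMerge_cons_eq]
    · simp only [runsAux, if_neg hk]
      rw [ih, runsS_cons, preMerge_head_ne k x n hk]
      simp

theorem runs_eq (arr : List String) : (runsAux [] arr).reverse = runsS arr := by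
  cases arr with
  | nil => simp [runsAux, runsS]
  | cons x xs =>
    show (runsAux [] (x :: xs)).reverse = _
    simp only [runsAux]
    rw [runsAux_eq, runsS_cons]
    simp
theorem preMerge_shape (k : String) (n : Int) (rs : List (String × Int))
    (hrs : ∀ p ∈ rs, 1 ≤ p.2) :
    ∃ m rest, preMerge k n rs = (k, m) :: rest ∧ n ≤ m := by
  cases rs with
  | nil => exact ⟨n, [], rfl, le_refl n⟩
  | cons p rest =>
    obtain ⟨y, m'⟩ := p
    by_cases hy : y = k
    · refine ⟨n + m', rest, by simp [preMerge, hy], ?_⟩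
      have := hrs (y, m') (List.mem_cons_self ..)
      simp at this; omega
    · exact ⟨n, (y, m') :: rest, by simp [preMerge, hy], le_refl n⟩

theorem runsS_pos (xs : List String) : ∀ p ∈ runsS xs, 1 ≤ p.2 := by
  induction xs with
  | nil => simp [runsS]
  | cons x xs ih =>
    rw [runsS_cons]
    cases h : runsS xs with
    | nil => simp [preMerge]
    | cons p rest =>
      obtain ⟨y, m⟩ := p
      have hm : (1:Int) ≤ m := by simpa using ih (y, m) (h ▸ List.mem_cons_self ..)
      have hrest : ∀ q ∈ rest, (1:Int) ≤ q.2 := fun q hq => ih q (h ▸ List.mem_cons_of_mem _ hq)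
      by_cases hy : y = x
      · simp only [preMerge, if_pos hy]
        intro q hq
        rcases List.mem_cons.mp hq with rfl | hq
        · simp; omega
        · exact hrest q hq
      · simp only [preMerge, if_neg hy]
        intro q hq
        rcases List.mem_cons.mp hq with rfl | hq
        · simp
        · rcases List.mem_cons.mp hq with rfl | hq
          · simpa using hm
          · exact hrest q hq

theorem goA_neg (length : Int) (hl : length < 1) :
    ∀ (xs : List String) (i t : Int), 0 ≤ t → goA length xs i t = -1 := by
  intro xs
  induction xs with
  | nil => intro i t _; simp [goA]
  | cons x xs ih =>
    intro i t ht
    by_cases hx : x = "."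
    · have hne : ¬ (t + 1 = length) := by omega
      simp [goA, hx, hne]
      exact ih (i + 1) (t + 1) (by omega)
    · simp [goA, hx]
      exact ih (i + 1) 0 (by omega)

theorem scan_shift (length : Int) (hl : 1 ≤ length) (x : String) (hx : ¬ x = ".")
    (rs : List (String × Int)) (i : Int) :
    scanRuns length (preMerge x 1 rs) i = scanRuns length (preMerge "." 0 rs) (i + 1) := by
  have h0 : ¬ (length ≤ (0:Int)) := by omega
  cases rs with
  | nil => simp [preMerge, scanRuns, hx, h0]
  | cons p rest =>
    obtain ⟨y, m⟩ := p
    by_cases hy : y = x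
    · subst hy
      simp [preMerge, scanRuns, hx, h0]
      congr 1
      ring
    · by_cases hyd : y = "."
      · subst hyd
        by_cases hm : length ≤ m
        · simp [preMerge, scanRuns, hx, hy, hm]
        · simp [preMerge, scanRuns, hx, hy, hm]
      · simp [preMerge, scanRuns, hx, hy, hyd, h0]

theorem scan_pre0 (length : Int) (hl : 1 ≤ length) (rs : List (String × Int)) (s : Int) :
    scanRuns length (preMerge "." 0 rs) s = scanRuns length rs s := by
  have h0 : ¬ (length ≤ (0:Int)) := by omega
  cases rs with
  | nil => simp [preMerge, scanRuns, h0]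
  | cons p rest =>
    obtain ⟨y, m⟩ := p
    by_cases hyd : y = "."
    · subst hyd
      simp [preMerge, scanRuns]
    · simp [preMerge, scanRuns, hyd, h0]

theorem main_lemma (length : Int) (hl : 1 ≤ length) :
    ∀ (xs : List String) (i t : Int), 0 ≤ t → t < length →
      goA length xs i t = scanRuns length (preMerge "." t (runsS xs)) (i - t) := by
  intro xs
  induction xs with
  | nil =>
    intro i t ht htl
    have hnt : ¬ (length ≤ t) := by omega
    simp [goA, runsS, preMerge, scanRuns, hnt]
  | cons x xs ih =>
    intro i t ht htl
    by_cases hx : x = "."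
    · subst hx
      rw [preMerge_cons_eq]
      by_cases he : t + 1 = length
      · simp only [goA]
        rw [if_true, if_pos he]
        obtain ⟨m, rest, hshape, hm⟩ := preMerge_shape "." (t + 1) (runsS xs) (runsS_pos xs)
        have hle : length ≤ m := by omega
        rw [hshape]
        simp [scanRuns, hle]
        omega
      · have h3 : i + 1 - (t + 1) = i - t := by omega
        simp only [goA]
        rw [if_true, if_neg he, ih (i + 1) (t + 1) (by omega) (by omega), h3]
    · simp only [goA, if_neg hx]
      rw [runsS_cons, preMerge_head_ne "." x t (fun h => hx h.symm)]
      have hnt : ¬ (length ≤ t) := by omega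
      have h4 : i - t + t = i := by omega
      have hstep : scanRuns length ((".", t) :: preMerge x 1 (runsS xs)) (i - t)
          = scanRuns length (preMerge x 1 (runsS xs)) i := by
        simp [scanRuns, hnt, h4]
      rw [hstep, scan_shift length hl x hx]
      rw [ih (i + 1) 0 (by omega) (by omega)]
      have h5 : i + 1 - 0 = i + 1 := by omega
      rw [h5]

theorem final_eq (arr : List String) (length : Int) :
    does_have_span_length arr length = does_have_span_length_alt arr length := by
  unfold does_have_span_length does_have_span_length_alt
  by_cases hl : length < 1
  · simp [hl]
    exact goA_neg length hl arr 0 0 (by omega)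
  · have hl' : 1 ≤ length := by omega
    simp [hl]
    rw [runs_eq, main_lemma length hl' arr 0 0 (by omega) (by omega)]
    have h0 : (0:Int) - 0 = 0 := by omega
    rw [h0, scan_pre0 length hl']

-- ===== VERDICT (by name: the statement is the Claim_ definition above) =====
theorem does_have_span_length_spec : Claim_equal_does_have_span_length := by
  intro arr length _
  unfold Spec_does_have_span_length
  exact final_eq arr length
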